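-- pv_equiv track=rewrite | github.com/kweaver-ai/kweaver-core | at-framework/scripts/ensure_path_scope_mapping.py | merge_subsystems
-- ===== SOURCE A (Python) =====
-- def merge_subsystems(template_subs: list[dict], scanned_subs: list[dict], existing_subs: list[dict] | None) -> list[dict]:
--     """合并：模板中的虚拟 scope + 已有条目（保留）+ 扫描出的新 scope（仅追加尚未存在的 id）。"""
--     by_id = {}
--     for s in template_subs:
--         by_id[s.get("id")] = dict(s)
--     if existing_subs:
--         for s in existing_subs:
--             by_id[s.get("id")] = dict(s)
--     for s in scanned_subs:
--         sid = s.get("id")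
--         if sid and sid not in by_id:
--             by_id[sid] = dict(s)
--     order = []
--     seen = set()
--     for s in template_subs:
--         sid = s.get("id")
--         if sid and sid not in seen:
--             order.append(sid)
--             seen.add(sid)
--     for s in (existing_subs or []):
--         sid = s.get("id")
--         if sid and sid not in seen:
--             order.append(sid)
--             seen.add(sid)
--     for s in scanned_subs:
--         sid = s.get("id")
--         if sid and sid not in seen:
--             order.append(sid)
--             seen.add(sid)
--     return [by_id[k] for k in order if k in by_id]
-- ===== SOURCE B (Python) =====
-- def merge_subsystems(template_subs: list[dict], scanned_subs: list[dict], existing_subs: list[dict] | None) -> list[dict]: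
--     """Single insertion-ordered dict: reassignment keeps position (existing overrides template), scanned only appends new ids."""
--     result = {}
--     for s in template_subs:
--         sid = s.get("id")
--         if sid:
--             result[sid] = dict(s)
--     for s in (existing_subs or []):
--         sid = s.get("id")
--         if sid:
--             result[sid] = dict(s)
--     for s in scanned_subs:
--         sid = s.get("id")
--         if sid and sid not in result:
--             result[sid] = dict(s)
--     return list(result.values())
-- ===== Notes on version B (the rewrite author's own statement) =====
-- stated objective: simpler
-- what changed: Replaces A's three data structures (by_id dict, order list, seen set) and six loops with one insertion-ordered dict built in three loops, relying on dict reassignment keeping position; returns list(result.values()).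
import Mathlib
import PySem

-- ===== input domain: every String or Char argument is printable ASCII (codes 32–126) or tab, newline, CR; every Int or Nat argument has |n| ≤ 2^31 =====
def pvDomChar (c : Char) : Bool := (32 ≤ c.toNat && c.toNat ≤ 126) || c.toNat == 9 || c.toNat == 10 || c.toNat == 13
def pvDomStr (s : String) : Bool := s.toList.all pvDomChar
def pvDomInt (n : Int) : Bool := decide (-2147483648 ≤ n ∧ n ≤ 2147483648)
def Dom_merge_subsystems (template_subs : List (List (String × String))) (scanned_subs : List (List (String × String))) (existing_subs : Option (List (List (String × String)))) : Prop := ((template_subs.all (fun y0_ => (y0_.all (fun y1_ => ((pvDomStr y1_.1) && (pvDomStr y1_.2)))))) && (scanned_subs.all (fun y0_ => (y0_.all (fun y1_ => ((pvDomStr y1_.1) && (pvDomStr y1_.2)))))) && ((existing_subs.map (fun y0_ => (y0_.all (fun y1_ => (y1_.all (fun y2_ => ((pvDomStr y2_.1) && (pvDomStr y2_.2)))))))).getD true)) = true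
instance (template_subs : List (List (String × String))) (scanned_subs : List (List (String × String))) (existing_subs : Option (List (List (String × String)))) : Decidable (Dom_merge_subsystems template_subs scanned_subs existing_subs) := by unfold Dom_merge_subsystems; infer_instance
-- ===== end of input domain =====

-- ===== PORT A =====
-- B merges into a single insertion-ordered dict instead of A's by_id dict + order list + seen set (objective: simpler).
-- s.get("id") on the dict s (assoc list, first match)
def pvGetId (s : List (String × String)) : Option String :=
  (PySem.Dict.mk s).get? "id"

-- truthiness of s.get("id") in Python: a non-empty string
def pvTruthy : Option String → Bool
  | some v => v ≠ ""
  | none => false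

-- by_id[s.get("id")] = dict(s)
def pvA_ins (d : PySem.Dict (Option String) (List (String × String))) (s : List (String × String)) : PySem.Dict (Option String) (List (String × String)) :=
  d.insert (pvGetId s) s

-- scanned loop on by_id: if sid and sid not in by_id: by_id[sid] = dict(s)
def pvA_scan (d : PySem.Dict (Option String) (List (String × String))) (s : List (String × String)) : PySem.Dict (Option String) (List (String × String)) :=
  let sid := pvGetId s
  if pvTruthy sid && !(d.contains sid) then d.insert sid s else d

-- order/seen loop body: if sid and sid not in seen: order.append(sid); seen.add(sid)
def pvA_ord (st : List String × PySem.Set String) (s : List (String × String)) : List String × PySem.Set String :=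
  match pvGetId s with
  | some v => if v ≠ "" && !(PySem.Set.contains st.2 v) then (st.1 ++ [v], PySem.Set.add st.2 v) else st
  | none => st

def merge_subsystems (template_subs : List (List (String × String))) (scanned_subs : List (List (String × String))) (existing_subs : Option (List (List (String × String)))) : List (List (String × String)) :=
  let d1 := template_subs.foldl pvA_ins PySem.Dict.empty
  -- if existing_subs: (truthy = some non-empty list)
  let d2 := match existing_subs with
    | some l => if l ≠ [] then l.foldl pvA_ins d1 else d1
    | none => d1
  let d3 := scanned_subs.foldl pvA_scan d2
  let st1 := template_subs.foldl pvA_ord ([], PySem.Set.empty)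
  let st2 := (existing_subs.getD []).foldl pvA_ord st1   -- for s in (existing_subs or [])
  let st3 := scanned_subs.foldl pvA_ord st2
  (st3.1.filter (fun k => d3.contains (some k))).map (fun k => d3.getD (some k) [])

-- ===== PORT B =====
-- result[sid] = dict(s) for truthy sid (overwrite keeps position)
def pvB_put (d : PySem.Dict String (List (String × String))) (s : List (String × String)) : PySem.Dict String (List (String × String)) :=
  match pvGetId s with
  | some v => if v ≠ "" then d.insert v s else d
  | none => d

-- result[sid] = dict(s) only for truthy sid not already present
def pvB_putNew (d : PySem.Dict String (List (String × String))) (s : List (String × String)) : PySem.Dict String (List (String × String)) :=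
  match pvGetId s with
  | some v => if v ≠ "" && !(d.contains v) then d.insert v s else d
  | none => d

def merge_subsystems_alt (template_subs : List (List (String × String))) (scanned_subs : List (List (String × String))) (existing_subs : Option (List (List (String × String)))) : List (List (String × String)) :=
  let r1 := template_subs.foldl pvB_put PySem.Dict.empty
  let r2 := (existing_subs.getD []).foldl pvB_put r1
  let r3 := scanned_subs.foldl pvB_putNew r2
  r3.values

-- ===== PRECONDITION & SPEC =====
def Spec_merge_subsystems (template_subs : List (List (String × String))) (scanned_subs : List (List (String × String))) (existing_subs : Option (List (List (String × String)))) (out : List (List (String × String))) : Prop := out = merge_subsystems_alt template_subs scanned_subs existing_subs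
instance (template_subs : List (List (String × String))) (scanned_subs : List (List (String × String))) (existing_subs : Option (List (List (String × String)))) (out : List (List (String × String))) : Decidable (Spec_merge_subsystems template_subs scanned_subs existing_subs out) := by unfold Spec_merge_subsystems; infer_instance

-- ===== CLAIM (what is proved, stated in full; the proofs are below) =====
def Claim_equal_merge_subsystems : Prop := ∀ (template_subs : List (List (String × String))) (scanned_subs : List (List (String × String))) (existing_subs : Option (List (List (String × String)))), Dom_merge_subsystems template_subs scanned_subs existing_subs → Spec_merge_subsystems template_subs scanned_subs existing_subs (merge_subsystems template_subs scanned_subs existing_subs)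

-- ===== LEMMAS AND PROOFS =====

-- Invariant tying A's (by_id, (order, seen)) state to B's single dict.
def pvRel (dA : PySem.Dict (Option String) (List (String × String))) (dB : PySem.Dict String (List (String × String))) (st : List String × PySem.Set String) : Prop :=
  st.2 = st.1 ∧ dB.keys = st.1 ∧ st.1.Nodup ∧ (∀ k ∈ st.1, k ≠ "") ∧
  (∀ v : String, v ≠ "" → dA.get? (some v) = dB.get? v)

theorem pvRel_init : pvRel PySem.Dict.empty PySem.Dict.empty ([], PySem.Set.empty) := by
  refine ⟨rfl, rfl, List.nodup_nil, by simp, ?_⟩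
  intro v _; simp [PySem.Dict.get?_empty]

theorem pvRel_step12 (dA : PySem.Dict (Option String) (List (String × String))) (dB : PySem.Dict String (List (String × String))) (st : List String × PySem.Set String) (x : List (String × String)) (h : pvRel dA dB st) :
    pvRel (pvA_ins dA x) (pvB_put dB x) (pvA_ord st x) := by
  obtain ⟨hseen, hkeys, hnd, hne, hval⟩ := h
  unfold pvA_ins pvB_put pvA_ord
  cases hx : pvGetId x with
  | none =>
    refine ⟨hseen, hkeys, hnd, hne, ?_⟩
    intro v hv
    rw [PySem.Dict.get?_insert_of_ne dA x (by simp)]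
    exact hval v hv
  | some w =>
    by_cases hw : w = ""
    · subst hw
      show pvRel (dA.insert (some "") x) (if ("" : String) ≠ "" then dB.insert "" x else dB)
        (if (decide (("" : String) ≠ "") && !(PySem.Set.contains st.2 "")) = true then (st.1 ++ [""], PySem.Set.add st.2 "") else st)
      rw [if_neg (by simp), if_neg (by simp)]
      refine ⟨hseen, hkeys, hnd, hne, ?_⟩
      intro v hv
      rw [PySem.Dict.get?_insert_of_ne dA x (by simp [hv])]
      exact hval v hv
    · have hbc : dB.contains w = decide (w ∈ st.1) := by
        rw [PySem.Dict.contains_eq_decide_mem_keys, hkeys]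
      have hmem : (w ∈ st.2) ↔ (w ∈ st.1) := by rw [hseen]
      have hshow : pvRel (dA.insert (some w) x) (if w ≠ "" then dB.insert w x else dB)
          (if (decide (w ≠ "") && !(PySem.Set.contains st.2 w)) = true then (st.1 ++ [w], PySem.Set.add st.2 w) else st) →
          pvRel (dA.insert (some w) x)
            (match some w with | some v => if v ≠ "" then dB.insert v x else dB | none => dB)
            (match some w with | some v => if (decide (v ≠ "") && !(PySem.Set.contains st.2 v)) = true then (st.1 ++ [v], PySem.Set.add st.2 v) else st | none => st) := fun h => h
      apply hshow
      by_cases hm : w ∈ st.1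
      · rw [if_pos (show (w:String) ≠ "" from hw), if_neg (by simp [hmem, hm])]
        refine ⟨hseen, ?_, hnd, hne, ?_⟩
        · rw [PySem.Dict.keys_insert_of_contains dB x (by simp [hbc, hm])]; exact hkeys
        · intro v hv
          rw [PySem.Dict.get?_insert dA (some w) (some v) x, PySem.Dict.get?_insert dB w v x]
          by_cases hvw : v = w <;> simp [hvw, hval v hv]
      · rw [if_pos (show (w:String) ≠ "" from hw), if_pos (by simp [hw, hmem, hm])]
        refine ⟨?_, ?_, ?_, ?_, ?_⟩
        · show PySem.Set.add st.2 w = st.1 ++ [w]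
          rw [hseen]; simp [PySem.Set.add, PySem.Set.contains_eq_listContains, hm]
        · rw [PySem.Dict.keys_insert_of_not_contains dB x (by simp [hbc, hm]), hkeys]
        · exact List.Nodup.append hnd (List.nodup_singleton w) (by simpa [List.disjoint_singleton] using hm)
        · intro k hk
          rcases List.mem_append.mp hk with hk | hk
          · exact hne k hk
          · simp at hk; subst hk; exact hw
        · intro v hv
          rw [PySem.Dict.get?_insert dA (some w) (some v) x, PySem.Dict.get?_insert dB w v x]
          by_cases hvw : v = w <;> simp [hvw, hval v hv]

theorem pvRel_step3 (dA : PySem.Dict (Option String) (List (String × String))) (dB : PySem.Dict String (List (String × String))) (st : List String × PySem.Set String) (x : List (String × String)) (h : pvRel dA dB st) :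
    pvRel (pvA_scan dA x) (pvB_putNew dB x) (pvA_ord st x) := by
  obtain ⟨hseen, hkeys, hnd, hne, hval⟩ := h
  unfold pvA_scan pvB_putNew pvA_ord
  cases hx : pvGetId x with
  | none =>
    show pvRel (if (pvTruthy none && !(dA.contains none)) = true then dA.insert none x else dA)
      (match (none : Option String) with | some v => if (decide (v ≠ "") && !(dB.contains v)) = true then dB.insert v x else dB | none => dB)
      (match (none : Option String) with | some v => if (decide (v ≠ "") && !(PySem.Set.contains st.2 v)) = true then (st.1 ++ [v], PySem.Set.add st.2 v) else st | none => st)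
    rw [if_neg (by simp [pvTruthy])]
    exact ⟨hseen, hkeys, hnd, hne, hval⟩
  | some w =>
    by_cases hw : w = ""
    · subst hw
      show pvRel (if (pvTruthy (some "") && !(dA.contains (some ""))) = true then dA.insert (some "") x else dA)
        (if (decide (("" : String) ≠ "") && !(dB.contains "")) = true then dB.insert "" x else dB)
        (if (decide (("" : String) ≠ "") && !(PySem.Set.contains st.2 "")) = true then (st.1 ++ [""], PySem.Set.add st.2 "") else st)
      rw [if_neg (by simp [pvTruthy]), if_neg (by simp), if_neg (by simp)]
      exact ⟨hseen, hkeys, hnd, hne, hval⟩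
    · have hbc : dB.contains w = decide (w ∈ st.1) := by
        rw [PySem.Dict.contains_eq_decide_mem_keys, hkeys]
      have hmem : (w ∈ st.2) ↔ (w ∈ st.1) := by rw [hseen]
      have hac : dA.contains (some w) = decide (w ∈ st.1) := by
        rw [PySem.Dict.contains_eq_isSome_get?, hval w hw, ← PySem.Dict.contains_eq_isSome_get?, hbc]
      have hshow : pvRel (if (pvTruthy (some w) && !(dA.contains (some w))) = true then dA.insert (some w) x else dA)
          (if (decide (w ≠ "") && !(dB.contains w)) = true then dB.insert w x else dB)
          (if (decide (w ≠ "") && !(PySem.Set.contains st.2 w)) = true then (st.1 ++ [w], PySem.Set.add st.2 w) else st) →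
          pvRel (if (pvTruthy (some w) && !(dA.contains (some w))) = true then dA.insert (some w) x else dA)
            (match some w with | some v => if (decide (v ≠ "") && !(dB.contains v)) = true then dB.insert v x else dB | none => dB)
            (match some w with | some v => if (decide (v ≠ "") && !(PySem.Set.contains st.2 v)) = true then (st.1 ++ [v], PySem.Set.add st.2 v) else st | none => st) := fun h => h
      apply hshow
      by_cases hm : w ∈ st.1
      · rw [if_neg (by simp [pvTruthy, hac, hm]), if_neg (by simp [hbc, hm]), if_neg (by simp [hmem, hm])]
        exact ⟨hseen, hkeys, hnd, hne, hval⟩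
      · rw [if_pos (by simp [pvTruthy, hw, hac, hm]), if_pos (by simp [hw, hbc, hm]), if_pos (by simp [hw, hmem, hm])]
        refine ⟨?_, ?_, ?_, ?_, ?_⟩
        · show PySem.Set.add st.2 w = st.1 ++ [w]
          rw [hseen]; simp [PySem.Set.add, PySem.Set.contains_eq_listContains, hm]
        · rw [PySem.Dict.keys_insert_of_not_contains dB x (by simp [hbc, hm]), hkeys]
        · exact List.Nodup.append hnd (List.nodup_singleton w) (by simpa [List.disjoint_singleton] using hm)
        · intro k hk
          rcases List.mem_append.mp hk with hk | hk
          · exact hne k hk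
          · simp at hk; subst hk; exact hw
        · intro v hv
          rw [PySem.Dict.get?_insert dA (some w) (some v) x, PySem.Dict.get?_insert dB w v x]
          by_cases hvw : v = w <;> simp [hvw, hval v hv]

theorem pvRel_fold12 (l : List (List (String × String))) (dA : PySem.Dict (Option String) (List (String × String))) (dB : PySem.Dict String (List (String × String))) (st : List String × PySem.Set String) (h : pvRel dA dB st) :
    pvRel (l.foldl pvA_ins dA) (l.foldl pvB_put dB) (l.foldl pvA_ord st) := by
  induction l generalizing dA dB st with
  | nil => exact h
  | cons x xs ih => exact ih _ _ _ (pvRel_step12 dA dB st x h)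

theorem pvRel_fold3 (l : List (List (String × String))) (dA : PySem.Dict (Option String) (List (String × String))) (dB : PySem.Dict String (List (String × String))) (st : List String × PySem.Set String) (h : pvRel dA dB st) :
    pvRel (l.foldl pvA_scan dA) (l.foldl pvB_putNew dB) (l.foldl pvA_ord st) := by
  induction l generalizing dA dB st with
  | nil => exact h
  | cons x xs ih => exact ih _ _ _ (pvRel_step3 dA dB st x h)

-- the core equality, with existing_subs already flattened to a plain list l
theorem pvCore (t l s : List (List (String × String))) :
    ((s.foldl pvA_ord (l.foldl pvA_ord (t.foldl pvA_ord ([], PySem.Set.empty)))).1.filter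
        (fun k => (s.foldl pvA_scan (l.foldl pvA_ins (t.foldl pvA_ins PySem.Dict.empty))).contains (some k))).map
      (fun k => (s.foldl pvA_scan (l.foldl pvA_ins (t.foldl pvA_ins PySem.Dict.empty))).getD (some k) []) =
    (s.foldl pvB_putNew (l.foldl pvB_put (t.foldl pvB_put PySem.Dict.empty))).values := by
  obtain ⟨_, hkeys, hnd, hne, hval⟩ :=
    pvRel_fold3 s _ _ _ (pvRel_fold12 l _ _ _ (pvRel_fold12 t _ _ _ pvRel_init))
  set d3 := s.foldl pvA_scan (l.foldl pvA_ins (t.foldl pvA_ins PySem.Dict.empty))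
  set r3 := s.foldl pvB_putNew (l.foldl pvB_put (t.foldl pvB_put PySem.Dict.empty))
  set st3 := s.foldl pvA_ord (l.foldl pvA_ord (t.foldl pvA_ord ([], PySem.Set.empty)))
  have hfil : st3.1.filter (fun k => d3.contains (some k)) = st3.1 := by
    apply List.filter_eq_self.mpr
    intro k hk
    have hkne : k ≠ "" := hne k hk
    rw [PySem.Dict.contains_eq_isSome_get?, hval k hkne, ← PySem.Dict.contains_eq_isSome_get?,
      PySem.Dict.contains_eq_decide_mem_keys, hkeys]
    simpa using hk
  rw [hfil, PySem.Dict.values_eq_map_keys r3 (hkeys ▸ hnd) [], hkeys]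
  apply List.map_congr_left
  intro k hk
  rw [PySem.Dict.getD_eq_get?_getD, PySem.Dict.getD_eq_get?_getD, hval k (hne k hk)]

-- ===== VERDICT (by name: the statement is the Claim_ definition above) =====
theorem merge_subsystems_spec : Claim_equal_merge_subsystems := by
  intro t s e _
  show merge_subsystems t s e = merge_subsystems_alt t s e
  cases e with
  | none => exact pvCore t [] s
  | some l =>
    cases l with
    | nil => exact pvCore t [] s
    | cons a as => exact pvCore t (a :: as) s
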